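-- pv_equiv track=rewrite | github.com/BillStark001/Mimigaraoboeru | theme_bias.py | get_maps
-- ===== SOURCE A (Python) =====
-- def get_maps(tfidf):
--     song_map = {}
--     song_map_t = []
--     word_map = {}
--     word_map_t = []
--     song_count = 0
--     word_count = 0
--     for i in tfidf:
--         song_map[i] = song_count
--         song_map_t.append(i)
--         song_count += 1
--         for j in tfidf[i]:
--             if not j[0] in word_map:
--                 word_map[j[0]] = word_count
--                 word_map_t.append(j[0])
--                 word_count += 1
--     return song_map, word_map, song_map_t, word_map_t
-- ===== SOURCE B (Python) =====
-- def get_maps(tfidf):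
--     # Alternative algorithm: instead of a forward pass with a membership guard,
--     # record each word's first-occurrence position by a BACKWARD overwrite pass,
--     # then sort the words by that position (sort-by-first-occurrence).
--     song_map_t = list(tfidf)
--     song_map = {k: i for i, k in enumerate(song_map_t)}
--     flat = [w for row in tfidf.values() for (w, _) in row]
--     first = {}
--     for pos, w in reversed(list(enumerate(flat))):
--         first[w] = pos          # iterating backwards, the first occurrence wins
--     word_map_t = sorted(first, key=first.get)
--     word_map = {w: i for i, w in enumerate(word_map_t)}
--     return song_map, word_map, song_map_t, word_map_t
-- ===== Notes on version B (the rewrite author's own statement) =====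
-- stated objective: alternative
-- what changed: Replaces A's single forward pass with a membership-guarded counter by a different algorithm: a backward overwrite pass records each word's first-occurrence position, the word table is obtained by SORTING the words by that position (sort-by-first-occurrence instead of guarded dedup), and both index dicts are built afterwards by enumerate comprehensions.
import Mathlib
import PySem

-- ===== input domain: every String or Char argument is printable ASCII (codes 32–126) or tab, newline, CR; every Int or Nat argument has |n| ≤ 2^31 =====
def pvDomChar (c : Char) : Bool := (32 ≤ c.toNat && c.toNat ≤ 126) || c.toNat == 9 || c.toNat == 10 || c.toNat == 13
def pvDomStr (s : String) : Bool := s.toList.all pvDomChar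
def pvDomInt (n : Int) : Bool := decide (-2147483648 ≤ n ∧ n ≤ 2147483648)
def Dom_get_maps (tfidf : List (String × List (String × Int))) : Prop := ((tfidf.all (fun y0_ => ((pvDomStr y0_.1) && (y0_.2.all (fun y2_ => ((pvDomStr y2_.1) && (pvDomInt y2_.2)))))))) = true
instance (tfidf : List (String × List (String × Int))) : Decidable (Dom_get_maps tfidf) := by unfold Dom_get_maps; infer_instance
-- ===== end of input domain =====

-- B uses a different algorithm: a backward overwrite pass records each word's first-occurrence
-- position and the word table is obtained by SORTING the words by that position; same results.

-- ===== PORT A =====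
-- loop state: (song_map, word_map, song_map_t, word_map_t, song_count, word_count)
abbrev AState := PySem.Dict String Int × PySem.Dict String Int × List String × List String × Int × Int

-- body of the inner 'for j in tfidf[i]' loop
def stepInnerA (st : PySem.Dict String Int × List String × Int) (j : String × Int) :
    PySem.Dict String Int × List String × Int :=
  if st.1.contains j.1 then st
  else (st.1.insert j.1 st.2.2, st.2.1 ++ [j.1], st.2.2 + 1)

-- body of the outer 'for i in tfidf' loop (i ranges over the dict's keys)
def stepOuterA (tfidf : List (String × List (String × Int))) (st : AState)
    (i : String × List (String × Int)) : AState :=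
  match st with
  | (sm, wm, smt, wmt, sc, wc) =>
    let sm := sm.insert i.1 sc
    let smt := smt ++ [i.1]
    let sc := sc + 1
    -- tfidf[i]: dict lookup; the key i comes from the dict itself, so it is present
    let row := (PySem.Dict.mk tfidf).getD i.1 []
    match row.foldl stepInnerA (wm, wmt, wc) with
    | (wm, wmt, wc) => (sm, wm, smt, wmt, sc, wc)

def get_maps (tfidf : List (String × List (String × Int))) :
    (List (String × Int)) × (List (String × Int)) × List String × List String :=
  match tfidf.foldl (stepOuterA tfidf)
      (PySem.Dict.empty, PySem.Dict.empty, ([] : List String), ([] : List String), (0 : Int), (0 : Int)) with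
  | (sm, wm, smt, wmt, _, _) => (sm.items, wm.items, smt, wmt)

-- ===== PORT B =====
def get_maps_alt (tfidf : List (String × List (String × Int))) :
    (List (String × Int)) × (List (String × Int)) × List String × List String :=
  let song_map_t := (PySem.Dict.mk tfidf).keys                        -- list(tfidf)
  let song_map := (PySem.List.enumerate song_map_t).map (fun p => (p.2, p.1))
  let flat := ((PySem.Dict.mk tfidf).values).flatMap (fun row => row.map (fun j => j.1))
  -- for pos, w in reversed(list(enumerate(flat))): first[w] = pos
  let first := ((PySem.List.enumerate flat).reverse).foldl
      (fun d p => d.insert p.2 p.1) (PySem.Dict.empty : PySem.Dict String Int)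
  -- sorted(first, key=first.get); every key of 'first' is present, so get = getD _ 0 there
  let word_map_t := PySem.List.sorted first.keys (fun w => first.getD w 0) false
  let word_map := (PySem.List.enumerate word_map_t).map (fun p => (p.2, p.1))
  (song_map, word_map, song_map_t, word_map_t)

-- ===== PRECONDITION & SPEC =====
-- Pre_ excludes association lists with duplicate keys: such a list denotes no Python dict
-- (building the dict collapses the duplicates), so A's behaviour there is not representable.
def Pre_get_maps (tfidf : List (String × List (String × Int))) : Prop :=
  (tfidf.map Prod.fst).Nodup

instance (tfidf : List (String × List (String × Int))) : Decidable (Pre_get_maps tfidf) := by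
  unfold Pre_get_maps; infer_instance

def pvWitness_get_maps : (List (String × List (String × Int))) :=
  [("a", [("x", 1), ("y", 2)]), ("b", [("x", 3)]), ("c", [])]

def Spec_get_maps (tfidf : List (String × List (String × Int))) (out : (List (String × Int)) × (List (String × Int)) × List String × List String) : Prop := out = get_maps_alt tfidf
instance (tfidf : List (String × List (String × Int))) (out : (List (String × Int)) × (List (String × Int)) × List String × List String) : Decidable (Spec_get_maps tfidf out) := by unfold Spec_get_maps; infer_instance

-- ===== CLAIM (what is proved, stated in full; the proofs are below) =====
def Claim_equal_get_maps : Prop := ∀ (tfidf : List (String × List (String × Int))), Dom_get_maps tfidf → Pre_get_maps tfidf → Spec_get_maps tfidf (get_maps tfidf)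

-- ===== LEMMAS AND PROOFS =====

-- proof-only variant of the outer step: the dict lookup replaced by the entry's own value
def stepOuterA' (st : AState) (i : String × List (String × Int)) : AState :=
  match st with
  | (sm, wm, smt, wmt, sc, wc) =>
    match i.2.foldl stepInnerA (wm, wmt, wc) with
    | (wm', wmt', wc') => (sm.insert i.1 sc, wm', smt ++ [i.1], wmt', sc + 1, wc')

-- the index dict's items: the table enumerated and swapped
def enumTbl (xs : List String) : List (String × Int) :=
  (PySem.List.enumerate xs).map (fun p => (p.2, p.1))

theorem foldl_congr_mem' {α β : Type} (l : List α) (f g : β → α → β) (s : β)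
    (h : ∀ s a, a ∈ l → f s a = g s a) : l.foldl f s = l.foldl g s := by
  induction l generalizing s with
  | nil => rfl
  | cons a l ih =>
    simp only [List.foldl_cons, h s a (by simp)]
    exact ih _ (fun s b hb => h s b (by simp [hb]))

theorem keys_mk_enumTbl (xs : List String) :
    (PySem.Dict.mk (enumTbl xs)).keys = xs := by
  simp only [enumTbl, PySem.Dict.keys_mk, List.map_map]
  have h : ((fun x : String × Int => x.1) ∘ fun p : Int × String => (p.2, p.1)) =
      (fun p : Int × String => p.2) := rfl
  rw [h]
  exact PySem.List.map_snd_enumerate ..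

theorem enumTbl_append_singleton (xs : List String) (x : String) :
    enumTbl (xs ++ [x]) = enumTbl xs ++ [(x, (xs.length : Int))] := by
  simp [enumTbl, PySem.List.enumerate_append, PySem.List.enumerate_cons]

theorem inner_fold_eq (ws : List (String × Int)) (wmt : List String) :
    ws.foldl stepInnerA (PySem.Dict.mk (enumTbl wmt), wmt, (wmt.length : Int)) =
      (PySem.Dict.mk (enumTbl (PySem.Set.update wmt (ws.map Prod.fst))),
       PySem.Set.update wmt (ws.map Prod.fst),
       ((PySem.Set.update wmt (ws.map Prod.fst)).length : Int)) := by
  induction ws generalizing wmt with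
  | nil => simp [PySem.Set.update]
  | cons j ws ih =>
    have hcont : (PySem.Dict.mk (enumTbl wmt)).contains j.1 = decide (j.1 ∈ wmt) := by
      rw [PySem.Dict.contains_eq_decide_mem_keys, keys_mk_enumTbl]
    by_cases hm : j.1 ∈ wmt
    · have hadd : PySem.Set.add wmt j.1 = wmt := by
        simp [PySem.Set.add, PySem.Set.contains, hm]
      have hstep : stepInnerA (PySem.Dict.mk (enumTbl wmt), wmt, (wmt.length : Int)) j =
          (PySem.Dict.mk (enumTbl wmt), wmt, (wmt.length : Int)) := by
        simp [stepInnerA, hcont, hm]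
      rw [List.foldl_cons, hstep, ih wmt]
      simp only [List.map_cons, PySem.Set.update, List.foldl_cons, hadd]
    · have hc : (PySem.Dict.mk (enumTbl wmt)).contains j.1 = false := by
        simp [hcont, hm]
      have hins : (PySem.Dict.mk (enumTbl wmt)).insert j.1 (wmt.length : Int) =
          PySem.Dict.mk (enumTbl (wmt ++ [j.1])) := by
        apply PySem.Dict.ext
        rw [PySem.Dict.items_insert_of_not_contains, enumTbl_append_singleton]
        exact hc
      have hstep : stepInnerA (PySem.Dict.mk (enumTbl wmt), wmt, (wmt.length : Int)) j =
          (PySem.Dict.mk (enumTbl (wmt ++ [j.1])), wmt ++ [j.1], ((wmt ++ [j.1]).length : Int)) := by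
        simp only [stepInnerA, hc, Bool.false_eq_true, if_false, hins]
        refine congrArg _ (congrArg _ ?_)
        simp
      have hadd : PySem.Set.add wmt j.1 = wmt ++ [j.1] := by
        simp [PySem.Set.add, PySem.Set.contains, hm]
      rw [List.foldl_cons, hstep, ih (wmt ++ [j.1])]
      simp only [List.map_cons, PySem.Set.update, List.foldl_cons, hadd]

def wordsOf (es : List (String × List (String × Int))) : List String :=
  es.flatMap (fun kv => kv.2.map Prod.fst)

theorem outer_fold_eq (es : List (String × List (String × Int))) (smt wmt : List String)
    (hnd : (smt ++ es.map Prod.fst).Nodup) :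
    es.foldl stepOuterA'
        (PySem.Dict.mk (enumTbl smt), PySem.Dict.mk (enumTbl wmt), smt, wmt,
         (smt.length : Int), (wmt.length : Int)) =
      (PySem.Dict.mk (enumTbl (smt ++ es.map Prod.fst)),
       PySem.Dict.mk (enumTbl (PySem.Set.update wmt (wordsOf es))),
       smt ++ es.map Prod.fst,
       PySem.Set.update wmt (wordsOf es),
       ((smt ++ es.map Prod.fst).length : Int),
       ((PySem.Set.update wmt (wordsOf es)).length : Int)) := by
  induction es generalizing smt wmt with
  | nil => simp [wordsOf, PySem.Set.update]
  | cons kv es ih =>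
    have hni : kv.1 ∉ smt := by
      rcases List.nodup_append.mp hnd with ⟨-, -, hdisj⟩
      intro h
      exact hdisj kv.1 h kv.1 (by simp) rfl
    have hc : (PySem.Dict.mk (enumTbl smt)).contains kv.1 = false := by
      rw [PySem.Dict.contains_eq_decide_mem_keys, keys_mk_enumTbl]
      simp [hni]
    have hins : (PySem.Dict.mk (enumTbl smt)).insert kv.1 (smt.length : Int) =
        PySem.Dict.mk (enumTbl (smt ++ [kv.1])) := by
      apply PySem.Dict.ext
      rw [PySem.Dict.items_insert_of_not_contains, enumTbl_append_singleton]
      exact hc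
    have hnd' : ((smt ++ [kv.1]) ++ es.map Prod.fst).Nodup := by
      simpa [List.append_assoc] using hnd
    have hstep : stepOuterA'
        (PySem.Dict.mk (enumTbl smt), PySem.Dict.mk (enumTbl wmt), smt, wmt,
         (smt.length : Int), (wmt.length : Int)) kv =
        (PySem.Dict.mk (enumTbl (smt ++ [kv.1])),
         PySem.Dict.mk (enumTbl (PySem.Set.update wmt (kv.2.map Prod.fst))),
         smt ++ [kv.1], PySem.Set.update wmt (kv.2.map Prod.fst),
         ((smt ++ [kv.1]).length : Int),
         ((PySem.Set.update wmt (kv.2.map Prod.fst)).length : Int)) := by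
      simp only [stepOuterA', inner_fold_eq, hins]
      refine congrArg _ (congrArg _ (congrArg _ (congrArg _ ?_)))
      refine congrArg (fun z => (z, _)) ?_
      simp
    rw [List.foldl_cons, hstep,
      ih (smt ++ [kv.1]) (PySem.Set.update wmt (kv.2.map Prod.fst)) hnd']
    simp only [wordsOf, List.map_cons, List.flatMap_cons, List.append_assoc,
      List.singleton_append, PySem.Set.update, List.foldl_append]

theorem step_congr (tfidf : List (String × List (String × Int)))
    (hnd : (tfidf.map Prod.fst).Nodup) :
    ∀ (st : AState) (kv : String × List (String × Int)), kv ∈ tfidf →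
      stepOuterA tfidf st kv = stepOuterA' st kv := by
  intro st kv hm
  obtain ⟨sm, wm, smt, wmt, sc, wc⟩ := st
  have hget : (PySem.Dict.mk tfidf).getD kv.1 [] = kv.2 := by
    apply PySem.Dict.getD_of_mem_items
    · exact hm
    · simpa [PySem.Dict.keys_mk] using hnd
  simp [stepOuterA, stepOuterA', hget]

-- ---------- B-side lemmas: the backward pass + sort rebuilds first-appearance order ----------

-- find? over an enumeration locates the first occurrence
theorem find_enum (xs : List String) (s : Int) (w : String) :
    (PySem.List.enumerate xs s).find? (fun p => p.2 == w) =
      (PySem.List.index? xs w).map (fun i => (s + (i : Int), w)) := by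
  induction xs generalizing s with
  | nil => simp [PySem.List.enumerate_nil]
  | cons x xs ih =>
    rw [PySem.List.enumerate_cons, List.find?_cons]
    by_cases hx : x = w
    · subst hx
      rw [PySem.List.index?_cons_self]
      simp
    · have hbeq : (x == w) = false := by simp [hx]
      rw [hbeq, PySem.List.index?_cons_of_ne xs hx]
      simp only [ih (s + 1)]
      cases PySem.List.index? xs w with
      | none => rfl
      | some i =>
        simp only [Option.map_some]
        refine congrArg _ (congrArg (fun z => (z, w)) ?_)
        push_cast
        ring

-- folding inserts: the LAST insert for a key wins
theorem get?_foldl_ins (L : List (Int × String)) (d : PySem.Dict String Int) (k : String) :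
    (L.foldl (fun d p => d.insert p.2 p.1) d).get? k =
      match L.reverse.find? (fun p => p.2 == k) with
      | some p => some p.1
      | none => d.get? k := by
  induction L generalizing d with
  | nil => simp
  | cons q L ih =>
    rw [List.foldl_cons, ih, List.reverse_cons, List.find?_append]
    cases hf : L.reverse.find? (fun p => p.2 == k) with
    | some p => simp
    | none =>
      simp only [Option.none_or]
      by_cases hq : q.2 = k
      · subst hq; simp [PySem.Dict.get?_insert_self]
      · have hb : (q.2 == k) = false := by simp [hq]
        simp [hb, PySem.Dict.get?_insert_of_ne d q.1 (fun h => hq h.symm)]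

-- the backward-overwrite dict maps each word to its FIRST occurrence index
theorem get?_firstDict (flat : List String) (w : String) :
    (((PySem.List.enumerate flat).reverse).foldl (fun d p => d.insert p.2 p.1)
        (PySem.Dict.empty : PySem.Dict String Int)).get? w =
      (PySem.List.index? flat w).map (fun i => (i : Int)) := by
  rw [get?_foldl_ins, List.reverse_reverse]
  have h := find_enum flat 0 w
  rw [h]
  cases PySem.List.index? flat w with
  | none => simp
  | some i => simp

theorem keys_firstDict (flat : List String) :
    (((PySem.List.enumerate flat).reverse).foldl (fun d p => d.insert p.2 p.1)
        (PySem.Dict.empty : PySem.Dict String Int)).keys =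
      PySem.Set.ofList flat.reverse := by
  have h := PySem.Dict.keys_foldl_insert_key (l := (PySem.List.enumerate flat).reverse)
      (key := fun p : Int × String => p.2) (f := fun _ p => p.1)
      (d := (PySem.Dict.empty : PySem.Dict String Int))
  rw [h]
  have hm : ((PySem.List.enumerate flat).reverse).map (fun p : Int × String => p.2) =
      flat.reverse := by
    rw [List.map_reverse, PySem.List.map_snd_enumerate]
  rw [hm]
  simp [PySem.Set.update_nil_left]

-- first-appearance dedup is strictly increasing under first-occurrence index
theorem pairwise_idx_dedup (xs : List String) :
    (PySem.List.dedup xs).Pairwise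
      (fun a b => (PySem.List.index? xs a).getD 0 < (PySem.List.index? xs b).getD 0) := by
  induction xs using List.reverseRecOn with
  | nil => simp [PySem.List.dedup]
  | append_singleton xs x ih =>
    simp only [PySem.List.dedup_eq_ofList, PySem.Set.ofList_append_singleton] at *
    by_cases hx : x ∈ xs
    · rw [PySem.Set.add_of_mem (by rw [PySem.Set.mem_ofList xs x]; exact hx)]
      refine ih.imp_of_mem ?_
      intro a b ha hb hab
      have ha' : a ∈ xs := (PySem.Set.mem_ofList _ _).mp ha
      have hb' : b ∈ xs := (PySem.Set.mem_ofList _ _).mp hb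
      rwa [PySem.List.index?_append_of_mem _ ha', PySem.List.index?_append_of_mem _ hb']
    · rw [PySem.Set.add_of_not_mem (by rw [PySem.Set.mem_ofList xs x]; exact hx)]
      rw [List.pairwise_append]
      refine ⟨?_, by simp, ?_⟩
      · refine ih.imp_of_mem ?_
        intro a b ha hb hab
        have ha' : a ∈ xs := (PySem.Set.mem_ofList _ _).mp ha
        have hb' : b ∈ xs := (PySem.Set.mem_ofList _ _).mp hb
        rwa [PySem.List.index?_append_of_mem _ ha', PySem.List.index?_append_of_mem _ hb']
      · intro a ha b hb
        have hb' : b = x := by simpa using hb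
        subst hb'
        have ha' : a ∈ xs := (PySem.Set.mem_ofList _ _).mp ha
        rw [PySem.List.index?_append_of_mem _ ha',
            PySem.List.index?_append_singleton_self xs _ hx]
        obtain ⟨i, hi⟩ := Option.isSome_iff_exists.mp
          ((PySem.List.index?_isSome_iff _ _).mpr ha')
        obtain ⟨hk, -, -⟩ := PySem.List.getElem_of_index?_eq_some hi
        rw [hi]
        simpa using hk

-- MAIN B lemma: sorting the words by first-occurrence position IS first-appearance order
theorem sorted_firstDict_eq_dedup (flat : List String) :
    (PySem.List.sorted
        ((((PySem.List.enumerate flat).reverse).foldl (fun d p => d.insert p.2 p.1)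
            (PySem.Dict.empty : PySem.Dict String Int)).keys)
        (fun w => (((PySem.List.enumerate flat).reverse).foldl (fun d p => d.insert p.2 p.1)
            (PySem.Dict.empty : PySem.Dict String Int)).getD w 0) false) =
      PySem.List.dedup flat := by
  apply PySem.List.sorted_eq_of_perm_of_pairwise_lt
  · -- (dedup flat).Perm keys
    rw [keys_firstDict]
    rw [List.perm_ext_iff_of_nodup (by simp) (PySem.Set.nodup_ofList _)]
    intro a
    rw [PySem.List.mem_dedup, PySem.Set.mem_ofList _ _, List.mem_reverse]
  · -- strictly increasing under the recorded first position
    refine (pairwise_idx_dedup flat).imp_of_mem ?_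
    intro a b ha hb hab
    have ha' : a ∈ flat := (PySem.List.mem_dedup _ _).mp ha
    have hb' : b ∈ flat := (PySem.List.mem_dedup _ _).mp hb
    obtain ⟨i, hi⟩ := Option.isSome_iff_exists.mp ((PySem.List.index?_isSome_iff _ _).mpr ha')
    obtain ⟨j, hj⟩ := Option.isSome_iff_exists.mp ((PySem.List.index?_isSome_iff _ _).mpr hb')
    have hga : (((PySem.List.enumerate flat).reverse).foldl (fun d p => d.insert p.2 p.1)
        (PySem.Dict.empty : PySem.Dict String Int)).getD a 0 = (i : Int) := by
      rw [PySem.Dict.getD_eq_get?_getD, get?_firstDict, hi]; rfl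
    have hgb : (((PySem.List.enumerate flat).reverse).foldl (fun d p => d.insert p.2 p.1)
        (PySem.Dict.empty : PySem.Dict String Int)).getD b 0 = (j : Int) := by
      rw [PySem.Dict.getD_eq_get?_getD, get?_firstDict, hj]; rfl
    rw [hga, hgb]
    rw [hi, hj] at hab
    simp at hab
    exact_mod_cast hab

-- ===== VERDICT (by name: the statement is the Claim_ definition above) =====
theorem get_maps_spec : Claim_equal_get_maps := by
  intro t _ hpre
  unfold Spec_get_maps get_maps get_maps_alt
  have h0 : (PySem.Dict.empty, PySem.Dict.empty, ([] : List String), ([] : List String),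
      (0 : Int), (0 : Int)) =
      ((PySem.Dict.mk (enumTbl []), PySem.Dict.mk (enumTbl []), ([] : List String),
        ([] : List String), (([] : List String).length : Int), (([] : List String).length : Int)) : AState) := by
    rfl
  rw [foldl_congr_mem' t (stepOuterA t) stepOuterA' _ (step_congr t hpre), h0,
    outer_fold_eq t [] [] (by simpa using hpre)]
  have hflat : ((PySem.Dict.mk t).values).flatMap (fun row => row.map (fun j => j.1)) =
      wordsOf t := by
    simp [wordsOf, PySem.Dict.values_mk, List.flatMap_map]
  simp only [hflat, sorted_firstDict_eq_dedup]
  simp [enumTbl, PySem.Set.update_nil_left, wordsOf]
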